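-- pv_equiv track=rewrite | github.com/novalym/velm-grimoire | atoms/ai.py | _scry_persona
-- ===== SOURCE A (Python) =====
-- def _scry_persona(intent: str, filename: str) -> str:
--     """
--     [ASCENSION 1]: Personification Logic.
--     Selects the optimal AI persona for the specific strike.
--     """
--     f = filename.lower()
--     i = intent.lower()
--
--     if any(x in f for x in [".sql", "schema", "database", "db"]):
--         return "Staff Database Architect & SQL Alchemist"
--     if any(x in f for x in ["docker", "k8s", "ci", "yml", "yaml", "config"]):
--         return "Senior SRE & Cloud Native Orchestrator"
--     if any(x in f for x in ["test", "spec", "audit"]):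
--         return "Lead QA Engineer & Forensic Inquisitor"
--     if any(x in f for x in [".tsx", ".jsx", ".css", "ui", "component"]):
--         return "Visionary UI/UX Engineer & React Master"
--     if any(x in f for x in ["security", "auth", "encrypt", "cipher"]):
--         return "CISO & Cryptographic Sentinel"
--
--     return "Principal Software Architect & Systems Thinker"
-- ===== SOURCE B (Python) =====
-- _PERSONAS = [
--     "Staff Database Architect & SQL Alchemist",
--     "Senior SRE & Cloud Native Orchestrator",
--     "Lead QA Engineer & Forensic Inquisitor",
--     "Visionary UI/UX Engineer & React Master",
--     "CISO & Cryptographic Sentinel",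
--     "Principal Software Architect & Systems Thinker",
-- ]
--
-- # flat keyword -> rule rank (rank = precedence of the rule group, 0 strongest)
-- _KW = {
--     ".sql": 0, "schema": 0, "database": 0, "db": 0,
--     "docker": 1, "k8s": 1, "ci": 1, "yml": 1, "yaml": 1, "config": 1,
--     "test": 2, "spec": 2, "audit": 2,
--     ".tsx": 3, ".jsx": 3, ".css": 3, "ui": 3, "component": 3,
--     "security": 4, "auth": 4, "encrypt": 4, "cipher": 4,
-- }
--
-- def _scry_persona(intent: str, filename: str) -> str:
--     # Single left-to-right scan of the lowered filename: at each position take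
--     # the minimum rank of any keyword starting there; the overall minimum rank
--     # equals the first matching group of the original precedence chain.
--     f = filename.lower()
--     best = 5
--     for j in range(len(f)):
--         suf = f[j:]
--         for kw, r in _KW.items():
--             if r < best and suf.startswith(kw):
--                 best = r
--     return _PERSONAS[best]
-- ===== Notes on version B (the rewrite author's own statement) =====
-- stated objective: alternative
-- what changed: Instead of testing each keyword group for membership anywhere in the filename (an if-chain of any(.. in f) tests), B scans the lowered filename position by position, keeping the minimum rule rank of any keyword from one flat keyword-to-rank map that starts at the current position; the minimum rank over all positions equals the first matching group of A's precedence chain.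
import Mathlib
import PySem

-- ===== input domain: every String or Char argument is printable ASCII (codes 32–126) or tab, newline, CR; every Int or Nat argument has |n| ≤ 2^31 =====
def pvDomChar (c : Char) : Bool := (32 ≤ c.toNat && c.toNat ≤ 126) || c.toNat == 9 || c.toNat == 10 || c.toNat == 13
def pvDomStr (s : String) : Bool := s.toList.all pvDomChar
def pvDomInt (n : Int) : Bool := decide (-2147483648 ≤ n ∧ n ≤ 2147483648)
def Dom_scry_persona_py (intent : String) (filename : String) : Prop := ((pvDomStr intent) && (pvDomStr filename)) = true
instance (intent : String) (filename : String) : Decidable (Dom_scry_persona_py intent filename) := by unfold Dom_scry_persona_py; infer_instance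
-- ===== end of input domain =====

-- B replaces A's keyword-group if-chain of substring-membership tests by a single
-- position-by-position scan of the lowered filename keeping the minimum rule rank
-- of any keyword (from one flat keyword->rank map) starting there; objective: alternative.


-- ===== PORT A =====
def scry_persona_py (intent : String) (filename : String) : String :=
  let f := PySem.Str.lower filename
  let _i := PySem.Str.lower intent
  if ([".sql", "schema", "database", "db"] : List String).any (fun x => PySem.Str.isIn x f) then
    "Staff Database Architect & SQL Alchemist"
  else if (["docker", "k8s", "ci", "yml", "yaml", "config"] : List String).any (fun x => PySem.Str.isIn x f) then
    "Senior SRE & Cloud Native Orchestrator"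
  else if (["test", "spec", "audit"] : List String).any (fun x => PySem.Str.isIn x f) then
    "Lead QA Engineer & Forensic Inquisitor"
  else if ([".tsx", ".jsx", ".css", "ui", "component"] : List String).any (fun x => PySem.Str.isIn x f) then
    "Visionary UI/UX Engineer & React Master"
  else if (["security", "auth", "encrypt", "cipher"] : List String).any (fun x => PySem.Str.isIn x f) then
    "CISO & Cryptographic Sentinel"
  else
    "Principal Software Architect & Systems Thinker"

-- ===== PORT B =====
-- B-side helpers: the persona table indexed by rank, and the flat keyword -> rank map
def pvPersonas : List String :=
  ["Staff Database Architect & SQL Alchemist",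
   "Senior SRE & Cloud Native Orchestrator",
   "Lead QA Engineer & Forensic Inquisitor",
   "Visionary UI/UX Engineer & React Master",
   "CISO & Cryptographic Sentinel",
   "Principal Software Architect & Systems Thinker"]

def pvKw : List (List Char × Nat) :=
  [(".sql".toList, 0), ("schema".toList, 0), ("database".toList, 0), ("db".toList, 0),
   ("docker".toList, 1), ("k8s".toList, 1), ("ci".toList, 1), ("yml".toList, 1),
   ("yaml".toList, 1), ("config".toList, 1),
   ("test".toList, 2), ("spec".toList, 2), ("audit".toList, 2),
   (".tsx".toList, 3), (".jsx".toList, 3), (".css".toList, 3), ("ui".toList, 3),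
   ("component".toList, 3),
   ("security".toList, 4), ("auth".toList, 4), ("encrypt".toList, 4), ("cipher".toList, 4)]

def scry_persona_py_alt (intent : String) (filename : String) : String :=
  let fl := (PySem.Str.lower filename).toList
  let best := (PySem.List.pyRange 0 (fl.length : Int) 1).foldl
    (fun best j =>
      let suf := PySem.Chars.slice fl (some j) none
      pvKw.foldl (fun b p => if p.2 < b ∧ PySem.Chars.startswith suf p.1 = true then p.2 else b) best)
    5
  pvPersonas.getD best ""

-- ===== PRECONDITION & SPEC =====
def Spec_scry_persona_py (intent : String) (filename : String) (out : String) : Prop := out = scry_persona_py_alt intent filename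
instance (intent : String) (filename : String) (out : String) : Decidable (Spec_scry_persona_py intent filename out) := by unfold Spec_scry_persona_py; infer_instance

-- ===== CLAIM =====
def Claim_equal_scry_persona_py : Prop := ∀ (intent : String) (filename : String), Dom_scry_persona_py intent filename → Spec_scry_persona_py intent filename (scry_persona_py intent filename)

-- ===== LEMMAS AND PROOFS =====

-- the ranks collected by B's scan, as one flat list
def pvRanksOf (fl : List Char) : List Nat :=
  (PySem.List.pyRange 0 (fl.length : Int) 1).flatMap
    (fun j => (pvKw.filter
        (fun p => PySem.Chars.startswith (PySem.Chars.slice fl (some j) none) p.1)).map (·.2))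

-- rank r has a keyword occurring in fl
def pvHit (fl : List Char) (r : Nat) : Prop :=
  ∃ p ∈ pvKw, p.2 = r ∧ PySem.Chars.isIn p.1 fl = true

lemma pv_inner_eq (suf : List Char) (l : List (List Char × Nat)) :
    ∀ b : Nat, l.foldl (fun b p => if p.2 < b ∧ PySem.Chars.startswith suf p.1 = true then p.2 else b) b
      = ((l.filter (fun p => PySem.Chars.startswith suf p.1)).map (·.2)).foldl min b := by
  induction l with
  | nil => intro b; rfl
  | cons p t ih =>
    intro b
    by_cases h : PySem.Chars.startswith suf p.1 = true
    · simp only [List.foldl_cons, List.filter_cons, h, and_true, if_true, List.map_cons,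
        List.foldl_cons]
      rw [ih]
      congr 1
      split_ifs <;> omega
    · simp only [List.foldl_cons, List.filter_cons, h, Bool.false_eq_true, and_false, if_false]
      rw [ih]

lemma pv_outer_eq (g : Int → List Nat) (l : List Int) :
    ∀ b : Nat, l.foldl (fun b j => (g j).foldl min b) b = (l.flatMap g).foldl min b := by
  induction l with
  | nil => intro b; rfl
  | cons j t ih => intro b; rw [List.flatMap_cons, List.foldl_append, List.foldl_cons, ih]

lemma pv_alt_eq (intent filename : String) :
    scry_persona_py_alt intent filename
      = pvPersonas.getD ((pvRanksOf (PySem.Str.lower filename).toList).foldl min 5) "" := by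
  unfold scry_persona_py_alt pvRanksOf
  simp only []
  rw [show (fun (best : Nat) (j : Int) =>
        pvKw.foldl (fun b p => if p.2 < b ∧ PySem.Chars.startswith (PySem.Chars.slice (PySem.Str.lower filename).toList (some j) none) p.1 = true then p.2 else b) best)
      = (fun (best : Nat) (j : Int) =>
        ((pvKw.filter (fun p => PySem.Chars.startswith (PySem.Chars.slice (PySem.Str.lower filename).toList (some j) none) p.1)).map (·.2)).foldl min best)
    from funext fun best => funext fun j => pv_inner_eq _ pvKw best]
  rw [pv_outer_eq]

lemma pv_occ_iff (fl kw : List Char) (hkw : kw ≠ []) :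
    (∃ j ∈ PySem.List.pyRange 0 (fl.length : Int) 1,
        PySem.Chars.startswith (PySem.Chars.slice fl (some j) none) kw = true)
      ↔ PySem.Chars.isIn kw fl = true := by
  constructor
  · rintro ⟨j, hj, hsw⟩
    rw [PySem.List.mem_pyRange_one] at hj
    rw [PySem.Chars.slice_eq_listSlice, PySem.List.slice_from fl hj.1] at hsw
    have hpre : kw <+: fl.drop j.toNat := by
      simpa [PySem.Chars.startswith, List.isPrefixOf_iff_prefix] using hsw
    exact (PySem.Chars.exists_prefix_drop_iff_isIn kw fl).mp ⟨j.toNat, hpre⟩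
  · intro hin
    obtain ⟨j, hpre⟩ := (PySem.Chars.exists_prefix_drop_iff_isIn kw fl).mpr hin
    have hjlt : j < fl.length := by
      by_contra h
      rw [Nat.not_lt] at h
      rw [List.drop_eq_nil_of_le h] at hpre
      exact hkw (List.prefix_nil.mp hpre)
    refine ⟨(j : Int), PySem.List.mem_pyRange_one.mpr ⟨Int.natCast_nonneg j, by exact_mod_cast hjlt⟩, ?_⟩
    rw [PySem.Chars.slice_eq_listSlice, PySem.List.slice_from fl (Int.natCast_nonneg j)]
    simpa [PySem.Chars.startswith, List.isPrefixOf_iff_prefix] using hpre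

lemma pv_kw_ne_nil : ∀ p ∈ pvKw, p.1 ≠ [] := by decide

lemma pv_mem_ranks_iff (fl : List Char) (r : Nat) : r ∈ pvRanksOf fl ↔ pvHit fl r := by
  unfold pvRanksOf pvHit
  simp only [List.mem_flatMap, List.mem_map, List.mem_filter]
  constructor
  · rintro ⟨j, hj, p, ⟨hp, hsw⟩, hr⟩
    exact ⟨p, hp, hr, (pv_occ_iff fl p.1 (pv_kw_ne_nil p hp)).mp ⟨j, hj, hsw⟩⟩
  · rintro ⟨p, hp, hr, hin⟩
    obtain ⟨j, hj, hsw⟩ := (pv_occ_iff fl p.1 (pv_kw_ne_nil p hp)).mpr hin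
    exact ⟨j, hj, p, ⟨hp, hsw⟩, hr⟩

lemma pv_rank_cases : ∀ p ∈ pvKw, p.2 = 0 ∨ p.2 = 1 ∨ p.2 = 2 ∨ p.2 = 3 ∨ p.2 = 4 := by decide

lemma pv_hit0 (s : String) : pvHit s.toList 0 ↔
    (([".sql", "schema", "database", "db"] : List String).any (fun x => PySem.Str.isIn x s)) = true := by
  simp [pvHit, pvKw, PySem.Str.isIn]

lemma pv_hit1 (s : String) : pvHit s.toList 1 ↔
    ((["docker", "k8s", "ci", "yml", "yaml", "config"] : List String).any (fun x => PySem.Str.isIn x s)) = true := by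
  simp [pvHit, pvKw, PySem.Str.isIn]

lemma pv_hit2 (s : String) : pvHit s.toList 2 ↔
    ((["test", "spec", "audit"] : List String).any (fun x => PySem.Str.isIn x s)) = true := by
  simp [pvHit, pvKw, PySem.Str.isIn]

lemma pv_hit3 (s : String) : pvHit s.toList 3 ↔
    (([".tsx", ".jsx", ".css", "ui", "component"] : List String).any (fun x => PySem.Str.isIn x s)) = true := by
  simp [pvHit, pvKw, PySem.Str.isIn]

lemma pv_hit4 (s : String) : pvHit s.toList 4 ↔
    ((["security", "auth", "encrypt", "cipher"] : List String).any (fun x => PySem.Str.isIn x s)) = true := by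
  simp [pvHit, pvKw, PySem.Str.isIn]

-- ===== VERDICT =====
theorem scry_persona_py_spec : Claim_equal_scry_persona_py := by
  intro intent filename _
  unfold Spec_scry_persona_py
  rw [pv_alt_eq]
  set s := PySem.Str.lower filename with hs
  set v := (pvRanksOf s.toList).foldl min 5 with hv
  have hle := PySem.List.foldl_min_le (pvRanksOf s.toList) 5
  have hmem := PySem.List.foldl_min_mem (pvRanksOf s.toList) 5
  rw [← hv] at hle hmem
  unfold scry_persona_py
  rw [← hs]
  by_cases h0 : (([".sql", "schema", "database", "db"] : List String).any (fun x => PySem.Str.isIn x s)) = true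
  · have hv0 : v = 0 := Nat.le_zero.mp (hle.2 0 ((pv_mem_ranks_iff _ _).mpr ((pv_hit0 s).mpr h0)))
    rw [if_pos h0, hv0]
    rfl
  by_cases h1 : ((["docker", "k8s", "ci", "yml", "yaml", "config"] : List String).any (fun x => PySem.Str.isIn x s)) = true
  all_goals try (
    have hn0 : v ≠ 0 := by
      intro hz
      rcases hmem with h5 | hm
      · omega
      · exact h0 ((pv_hit0 s).mp ((pv_mem_ranks_iff _ _).mp (hz ▸ hm))))
  · have hv1 : v = 1 := by
      have := hle.2 1 ((pv_mem_ranks_iff _ _).mpr ((pv_hit1 s).mpr h1))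
      omega
    rw [if_neg h0, if_pos h1, hv1]
    rfl
  by_cases h2 : ((["test", "spec", "audit"] : List String).any (fun x => PySem.Str.isIn x s)) = true
  all_goals try (
    have hn1 : v ≠ 1 := by
      intro hz
      rcases hmem with h5 | hm
      · omega
      · exact h1 ((pv_hit1 s).mp ((pv_mem_ranks_iff _ _).mp (hz ▸ hm))))
  · have hv2 : v = 2 := by
      have := hle.2 2 ((pv_mem_ranks_iff _ _).mpr ((pv_hit2 s).mpr h2))
      omega
    rw [if_neg h0, if_neg h1, if_pos h2, hv2]
    rfl
  by_cases h3 : (([".tsx", ".jsx", ".css", "ui", "component"] : List String).any (fun x => PySem.Str.isIn x s)) = true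
  all_goals try (
    have hn2 : v ≠ 2 := by
      intro hz
      rcases hmem with h5 | hm
      · omega
      · exact h2 ((pv_hit2 s).mp ((pv_mem_ranks_iff _ _).mp (hz ▸ hm))))
  · have hv3 : v = 3 := by
      have := hle.2 3 ((pv_mem_ranks_iff _ _).mpr ((pv_hit3 s).mpr h3))
      omega
    rw [if_neg h0, if_neg h1, if_neg h2, if_pos h3, hv3]
    rfl
  by_cases h4 : ((["security", "auth", "encrypt", "cipher"] : List String).any (fun x => PySem.Str.isIn x s)) = true
  all_goals try (
    have hn3 : v ≠ 3 := by
      intro hz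
      rcases hmem with h5 | hm
      · omega
      · exact h3 ((pv_hit3 s).mp ((pv_mem_ranks_iff _ _).mp (hz ▸ hm))))
  · have hv4 : v = 4 := by
      have := hle.2 4 ((pv_mem_ranks_iff _ _).mpr ((pv_hit4 s).mpr h4))
      omega
    rw [if_neg h0, if_neg h1, if_neg h2, if_neg h3, if_pos h4, hv4]
    rfl
  · have hv5 : v = 5 := by
      rcases hmem with h5 | hm
      · exact h5
      · obtain ⟨p, hp, hr, hin⟩ := (pv_mem_ranks_iff _ _).mp hm
        rcases pv_rank_cases p hp with h | h | h | h | h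
        · exact absurd ((pv_hit0 s).mp ⟨p, hp, h, hin⟩) h0
        · exact absurd ((pv_hit1 s).mp ⟨p, hp, h, hin⟩) h1
        · exact absurd ((pv_hit2 s).mp ⟨p, hp, h, hin⟩) h2
        · exact absurd ((pv_hit3 s).mp ⟨p, hp, h, hin⟩) h3
        · exact absurd ((pv_hit4 s).mp ⟨p, hp, h, hin⟩) h4
    rw [if_neg h0, if_neg h1, if_neg h2, if_neg h3, if_neg h4, hv5]
    rfl
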